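-- pv_equiv track=rewrite | github.com/ins72/meway | fix_all_syntax.py | fix_function_parameters
-- ===== SOURCE A (Python) =====
-- def fix_function_parameters(param_lines):
--     """Fix function parameter ordering and syntax"""
--     if not param_lines:
--         return param_lines
--
--     # Join all parameter lines
--     full_params = '\n'.join(param_lines)
--
--     # Extract individual parameters
--     params = []
--     current_param = ""
--
--     for line in param_lines[1:]:  # Skip the function definition line
--         stripped = line.strip()
--         if stripped and not stripped.startswith(')'):
--             if stripped.endswith(','):
--                 current_param += stripped
--                 params.append(current_param.strip())
--                 current_param = ""
--             else:
--                 current_param += stripped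
--
--     if current_param.strip():
--         params.append(current_param.strip())
--
--     # Separate parameters with defaults from those without
--     params_with_defaults = []
--     params_without_defaults = []
--
--     for param in params:
--         if '=' in param and 'Body(...)' in param:
--             params_with_defaults.append(param)
--         elif '=' in param:
--             params_with_defaults.append(param)
--         else:
--             # Add Body(...) to parameters without defaults that look like request bodies
--             if any(word in param.lower() for word in ['create', 'update']) and ':' in param:
--                 param = param.rstrip(',') + ' = Body(...),'
--                 params_with_defaults.append(param)
--             else:
--                 params_without_defaults.append(param)
--
--     # Reconstruct the function definition
--     result = [param_lines[0]]  # Function definition line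
--
--     # Add parameters without defaults first
--     for param in params_without_defaults:
--         result.append(f"    {param}")
--
--     # Add parameters with defaults
--     for param in params_with_defaults:
--         result.append(f"    {param}")
--
--     return result
-- ===== SOURCE B (Python) =====
-- def fix_function_parameters(param_lines):
--     """Fix function parameter ordering and syntax (one tagged pass + stable sort)."""
--     if not param_lines:
--         return param_lines
--
--     def classify(p):
--         # returns (has_default, final_text)
--         if '=' in p:
--             return (True, p)
--         if ('create' in p.lower() or 'update' in p.lower()) and ':' in p:
--             return (True, p.rstrip(',') + ' = Body(...),')
--         return (False, p)
--
--     tagged = []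
--     current = ""
--     for line in param_lines[1:]:
--         stripped = line.strip()
--         if stripped and not stripped.startswith(')'):
--             current += stripped
--             if stripped.endswith(','):
--                 tagged.append(classify(current.strip()))
--                 current = ""
--     if current.strip():
--         tagged.append(classify(current.strip()))
--
--     tagged.sort(key=lambda t: t[0])  # stable: without-defaults (False) first
--     return [param_lines[0]] + ["    " + text for _, text in tagged]
-- ===== Notes on version B (the rewrite author's own statement) =====
-- stated objective: simpler
-- what changed: A's two bucket lists and two separate output loops are replaced by a single pass that emits (has_default, text) tags, with the Body(...) transform fused into one classify step, followed by one stable sort on the flag.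
import Mathlib
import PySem

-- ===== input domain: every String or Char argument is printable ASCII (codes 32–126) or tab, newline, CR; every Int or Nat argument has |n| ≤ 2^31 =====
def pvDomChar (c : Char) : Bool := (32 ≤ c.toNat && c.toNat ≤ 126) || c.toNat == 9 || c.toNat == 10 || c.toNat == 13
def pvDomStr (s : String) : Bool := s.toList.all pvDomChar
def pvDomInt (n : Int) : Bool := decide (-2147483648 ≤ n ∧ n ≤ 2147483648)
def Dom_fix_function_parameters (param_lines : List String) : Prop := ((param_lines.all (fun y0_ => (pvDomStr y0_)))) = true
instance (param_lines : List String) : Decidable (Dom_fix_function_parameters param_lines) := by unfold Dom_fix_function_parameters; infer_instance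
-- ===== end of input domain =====

-- B replaces A's two bucket lists and two output loops by one tagged pass plus one
-- stable sort on the has-default flag (objective: simpler decomposition, same cost).

-- exact port of Python's s.rstrip(',') (PySem has no chars-argument rstrip), used by both ports
def pyRstripComma (s : String) : String :=
  String.ofList ((s.toList.reverse.dropWhile (· == ',')).reverse)

-- ===== PORT A =====
-- the parameter-collection loop of A: state = (params, current_param)
def fixA_step (st : List String × String) (line : String) : List String × String :=
  let stripped := PySem.Str.strip line
  if stripped ≠ "" ∧ ¬ (PySem.Str.startswith stripped ")") then
    if PySem.Str.endswith stripped "," then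
      (st.1 ++ [PySem.Str.strip (st.2 ++ stripped)], "")
    else
      (st.1, st.2 ++ stripped)
  else st

-- the classification loop of A: state = (params_with_defaults, params_without_defaults)
def fixA_classify (st : List String × List String) (param : String) : List String × List String :=
  if PySem.Str.isIn "=" param ∧ PySem.Str.isIn "Body(...)" param then
    (st.1 ++ [param], st.2)
  else if PySem.Str.isIn "=" param then
    (st.1 ++ [param], st.2)
  else if (PySem.Str.isIn "create" (PySem.Str.lower param) ∨
           PySem.Str.isIn "update" (PySem.Str.lower param)) ∧ PySem.Str.isIn ":" param then
    (st.1 ++ [pyRstripComma param ++ " = Body(...),"], st.2)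
  else
    (st.1, st.2 ++ [param])

def fix_function_parameters (param_lines : List String) : List String :=
  match param_lines with
  | [] => param_lines
  | head :: rest =>
    let _full_params := PySem.Str.join "\n" param_lines  -- A computes this and never uses it
    let pc := rest.foldl fixA_step ([], "")
    let params :=
      if PySem.Str.strip pc.2 ≠ "" then pc.1 ++ [PySem.Str.strip pc.2] else pc.1
    let wdwo := params.foldl fixA_classify ([], [])
    let result := [head]
    let result := wdwo.2.foldl (fun r p => r ++ ["    " ++ p]) result
    let result := wdwo.1.foldl (fun r p => r ++ ["    " ++ p]) result
    result

-- ===== PORT B =====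
-- B's classifier: (has_default, final_text)
def fixB_classify (p : String) : Bool × String :=
  if PySem.Str.isIn "=" p then (true, p)
  else if (PySem.Str.isIn "create" (PySem.Str.lower p) || PySem.Str.isIn "update" (PySem.Str.lower p))
          && PySem.Str.isIn ":" p then
    (true, pyRstripComma p ++ " = Body(...),")
  else (false, p)

-- B's single pass: state = (tagged, current)
def fixB_step (st : List (Bool × String) × String) (line : String) : List (Bool × String) × String :=
  let stripped := PySem.Str.strip line
  if stripped ≠ "" ∧ ¬ (PySem.Str.startswith stripped ")") then
    let current := st.2 ++ stripped
    if PySem.Str.endswith stripped "," then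
      (st.1 ++ [fixB_classify (PySem.Str.strip current)], "")
    else (st.1, current)
  else st

def fix_function_parameters_alt (param_lines : List String) : List String :=
  match param_lines with
  | [] => param_lines
  | head :: rest =>
    let tc := rest.foldl fixB_step ([], "")
    let tagged :=
      if PySem.Str.strip tc.2 ≠ "" then tc.1 ++ [fixB_classify (PySem.Str.strip tc.2)] else tc.1
    let sorted := PySem.List.sorted tagged (fun t => t.1)  -- stable: False (no default) first
    head :: sorted.map (fun t => "    " ++ t.2)

-- ===== PRECONDITION & SPEC =====
def Spec_fix_function_parameters (param_lines : List String) (out : List String) : Prop := out = fix_function_parameters_alt param_lines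
instance (param_lines : List String) (out : List String) : Decidable (Spec_fix_function_parameters param_lines out) := by unfold Spec_fix_function_parameters; infer_instance

-- ===== CLAIM (what is proved, stated in full; the proofs are below) =====
def Claim_equal_fix_function_parameters : Prop := ∀ (param_lines : List String), Dom_fix_function_parameters param_lines → Spec_fix_function_parameters param_lines (fix_function_parameters param_lines)

-- ===== LEMMAS AND PROOFS =====

-- B's collection pass tracks A's, with tagged = map fixB_classify params
theorem fixB_foldl_eq (lines : List String) (ps : List String) (cur : String) :
    lines.foldl fixB_step (ps.map fixB_classify, cur)
      = ((lines.foldl fixA_step (ps, cur)).1.map fixB_classify,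
         (lines.foldl fixA_step (ps, cur)).2) := by
  induction lines generalizing ps cur with
  | nil => rfl
  | cons l ls ih =>
    simp only [List.foldl_cons, fixB_step, fixA_step]
    split_ifs with h1 h2
    · have := ih (ps ++ [PySem.Str.strip (cur ++ PySem.Str.strip l)]) ""
      simpa using this
    · exact ih ps (cur ++ PySem.Str.strip l)
    · exact ih ps cur

-- one step of A's classification loop, expressed through B's classifier
theorem classify_step (st : List String × List String) (p : String) :
    fixA_classify st p =
      if (fixB_classify p).1 then (st.1 ++ [(fixB_classify p).2], st.2)
      else (st.1, st.2 ++ [(fixB_classify p).2]) := by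
  unfold fixA_classify fixB_classify
  simp only [Bool.and_eq_true, Bool.or_eq_true]
  split_ifs <;> simp_all

-- A's classification loop = filters of the tagged list
theorem fixA_classify_foldl (params : List String) (wd wod : List String) :
    params.foldl fixA_classify (wd, wod)
      = (wd ++ ((params.map fixB_classify).filter (fun t => t.1)).map (·.2),
         wod ++ ((params.map fixB_classify).filter (fun t => !t.1)).map (·.2)) := by
  induction params generalizing wd wod with
  | nil => simp
  | cons p ps ih =>
    rw [List.foldl_cons, classify_step]
    rcases hcl : fixB_classify p with ⟨b, t⟩
    cases b <;> simp [hcl, ih, List.append_assoc]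

-- inserting x before the first element the predicate accepts, through a prefix it rejects
theorem insertBy_skip_prefix {α : Type} (before : α → α → Bool) (x : α) (F T : List α)
    (hF : ∀ y ∈ F, before x y = false)
    (hT : ∀ t ts, T = t :: ts → before x t = true) :
    PySem.List.insertBy before x (F ++ T) = F ++ x :: T := by
  induction F with
  | nil =>
    cases T with
    | nil => rfl
    | cons t ts => simp [PySem.List.insertBy, hT t ts rfl]
  | cons f F' ih =>
    simp only [List.cons_append, PySem.List.insertBy, hF f (by simp)]
    simp only [Bool.false_eq_true, if_false]
    exact congrArg (f :: ·) (ih (fun y hy => hF y (by simp [hy])))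

-- a stable sort on the Bool flag is: the False-flagged elements, then the True-flagged ones
theorem sorted_bool_flag {α : Type} (xs : List (Bool × α)) :
    PySem.List.sorted xs (fun t => t.1)
      = xs.filter (fun t => !t.1) ++ xs.filter (fun t => t.1) := by
  rw [PySem.List.sorted_eq_foldl_insertBy]
  induction xs using List.reverseRecOn with
  | nil => rfl
  | append_singleton ys x ih =>
    rw [List.foldl_append, List.foldl_cons, List.foldl_nil, ih]
    rcases x with ⟨b, a⟩
    cases b with
    | true =>
      rw [PySem.List.insertBy_of_forall_not_before]
      · simp
      · intro y _; rcases y with ⟨by', a'⟩; cases by' <;> rfl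
    | false =>
      rw [insertBy_skip_prefix]
      · simp
      · intro y hy
        have : y.1 = false := by
          have := List.of_mem_filter hy
          simpa using this
        simp [this]
      · intro t ts hts
        have ht : t ∈ ys.filter (fun t => t.1) := by rw [hts]; simp
        have : t.1 = true := by simpa using List.of_mem_filter ht
        simp [this]

-- ===== VERDICT (by name: the statement is the Claim_ definition above) =====
theorem fix_function_parameters_spec : Claim_equal_fix_function_parameters := by
  intro param_lines _
  unfold Spec_fix_function_parameters
  cases param_lines with
  | nil => rfl
  | cons head rest =>
    simp only [fix_function_parameters, fix_function_parameters_alt]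
    have hfold := fixB_foldl_eq rest [] ""
    simp only [List.map_nil] at hfold
    rw [hfold]
    rcases h : rest.foldl fixA_step ([], "") with ⟨params0, cur⟩
    simp only []
    split_ifs with hcur
    · rw [show (params0.map fixB_classify ++ [fixB_classify (PySem.Str.strip cur)])
            = (params0 ++ [PySem.Str.strip cur]).map fixB_classify by simp]
      rw [sorted_bool_flag, fixA_classify_foldl,
          PySem.List.foldl_append_singleton_eq_map, PySem.List.foldl_append_singleton_eq_map]
      simp [List.map_append, List.map_map, Function.comp_def]
    · rw [sorted_bool_flag, fixA_classify_foldl,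
          PySem.List.foldl_append_singleton_eq_map, PySem.List.foldl_append_singleton_eq_map]
      simp [List.map_append, List.map_map, Function.comp_def]
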